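-- pv_equiv track=rewrite | github.com/ParasharaRamesh/EPIJudge | epi_judge_python/sort_increasing_decreasing_array.py | find_each_sequence
-- ===== SOURCE A (Python) =====
-- from collections import deque
--
-- def find_each_sequence(a):
--     increasing = True
--     sequences = [deque([a[0]])]
--     for i in range(1,len(a)):
--         if increasing and a[i-1] <= a[i]:
--             sequences[-1].append(a[i])
--         elif not increasing and a[i-1] >= a[i]:
--             sequences[-1].appendleft(a[i])
--         else:
--             increasing ^= True
--             sequences.append(deque([a[i]]))
--     return list(map(lambda x: list(x), sequences))
-- ===== SOURCE B (Python) =====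
-- def find_each_sequence(a):
--     a[0]  # empty input raises IndexError, as in the original
--     n = len(a)
--     bounds = [0]
--     inc = True
--     for i in range(1, n):
--         if (inc and a[i - 1] > a[i]) or (not inc and a[i - 1] < a[i]):
--             bounds.append(i)
--             inc = not inc
--     bounds.append(n)
--     out = []
--     inc = True
--     for lo, hi in zip(bounds, bounds[1:]):
--         run = a[lo:hi]
--         out.append(run if inc else run[::-1])
--         inc = not inc
--     return out
-- ===== Notes on version B (the rewrite author's own statement) =====
-- stated objective: alternative
-- what changed: Replaces the incremental deque building (append/appendleft into the last deque) by two passes: first record the run-boundary indices where the forced alternating direction flips, then slice each run out of the array, reversing the descending runs.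
import Mathlib
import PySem

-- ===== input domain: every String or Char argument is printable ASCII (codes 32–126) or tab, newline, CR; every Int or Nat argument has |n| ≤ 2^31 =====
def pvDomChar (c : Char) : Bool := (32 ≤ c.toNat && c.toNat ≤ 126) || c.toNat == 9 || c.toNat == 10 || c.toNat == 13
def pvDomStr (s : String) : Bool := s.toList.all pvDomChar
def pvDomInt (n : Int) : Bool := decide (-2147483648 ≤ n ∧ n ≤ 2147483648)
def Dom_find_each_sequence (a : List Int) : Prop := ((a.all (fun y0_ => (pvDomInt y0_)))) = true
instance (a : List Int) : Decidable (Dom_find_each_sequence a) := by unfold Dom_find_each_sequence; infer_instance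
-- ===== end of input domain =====

-- B replaces A's incremental deque construction by a boundary-finding pass plus slicing
-- (descending runs reversed); same O(n) cost, different decomposition. Proven equal on nonempty lists.


-- ===== PORT A =====
-- sequences[-1].append / appendleft: modify the last deque (deque ported as List Int)
def pvModLast (f : List Int → List Int) : List (List Int) → List (List Int)
  | [] => []
  | [x] => [f x]
  | x :: y :: xs => x :: pvModLast f (y :: xs)

def pvStepA (a : List Int) (st : Bool × List (List Int)) (i : Int) : Bool × List (List Int) :=
  let prev := PySem.List.pyGetD a (i - 1) 0
  let cur := PySem.List.pyGetD a i 0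
  if st.1 && decide (prev ≤ cur) then (st.1, pvModLast (fun d => d ++ [cur]) st.2)
  else if !st.1 && decide (prev ≥ cur) then (st.1, pvModLast (fun d => cur :: d) st.2)
  else (!st.1, st.2 ++ [[cur]])

def find_each_sequence (a : List Int) : List (List Int) :=
  -- first-element access: Python raises IndexError on the empty list; Pre_ excludes that input, so the default is never used
  let a0 := PySem.List.pyGetD a 0 0
  ((PySem.List.pyRange 1 (a.length : Int) 1).foldl (pvStepA a) (true, [[a0]])).2

-- ===== PORT B =====
def pvStepB (a : List Int) (st : Bool × List Int) (i : Int) : Bool × List Int :=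
  let prev := PySem.List.pyGetD a (i - 1) 0
  let cur := PySem.List.pyGetD a i 0
  if (st.1 && decide (prev > cur)) || (!st.1 && decide (prev < cur)) then (!st.1, st.2 ++ [i])
  else st

def pvEmit (a : List Int) (st : Bool × List (List Int)) (p : Int × Int) : Bool × List (List Int) :=
  let run := PySem.List.slice a (some p.1) (some p.2)
  (!st.1, st.2 ++ [if st.1 then run else run.reverse])

def find_each_sequence_alt (a : List Int) : List (List Int) :=
  -- first-element access: raises on the empty list; Pre_ excludes that input
  let n : Int := (a.length : Int)
  let s := (PySem.List.pyRange 1 n 1).foldl (pvStepB a) (true, [0])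
  let bounds := s.2 ++ [n]
  ((bounds.zip (PySem.List.slice bounds (some 1) none)).foldl (pvEmit a) (true, [])).2

-- ===== PRECONDITION & SPEC =====
-- Pre_ excludes only the empty list, on which both Pythons raise IndexError at the initial element access.
def Pre_find_each_sequence (a : List Int) : Prop := a ≠ []
instance (a : List Int) : Decidable (Pre_find_each_sequence a) := by unfold Pre_find_each_sequence; infer_instance
def pvWitness_find_each_sequence : List Int := ([1, 3, 2, 0, 4])

def Spec_find_each_sequence (a : List Int) (out : List (List Int)) : Prop := out = find_each_sequence_alt a
instance (a : List Int) (out : List (List Int)) : Decidable (Spec_find_each_sequence a out) := by unfold Spec_find_each_sequence; infer_instance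

-- ===== CLAIM (what is proved, stated in full; the proofs are below) =====
def Claim_equal_find_each_sequence : Prop := ∀ (a : List Int), Dom_find_each_sequence a → Pre_find_each_sequence a → Spec_find_each_sequence a (find_each_sequence a)

-- ===== LEMMAS AND PROOFS =====

def pvSeg (a : List Int) (inc : Bool) (p q : Int) : List Int :=
  if inc then PySem.List.slice a (some p) (some q)
  else (PySem.List.slice a (some p) (some q)).reverse

def pvRender (a : List Int) : Bool → List Int → List (List Int)
  | _, [] => []
  | _, [_] => []
  | inc, p :: q :: rest => pvSeg a inc p q :: pvRender a (!inc) (q :: rest)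

lemma pvEmit_fold (a : List Int) (bds : List Int) : ∀ (inc : Bool) (out : List (List Int)),
    ((bds.zip (bds.drop 1)).foldl (pvEmit a) (inc, out)).2 = out ++ pvRender a inc bds := by
  induction bds with
  | nil => intro inc out; simp [pvRender]
  | cons p rest ih =>
    intro inc out
    cases rest with
    | nil => simp [pvRender]
    | cons q rest' =>
      simp only [List.drop_succ_cons, List.drop_zero, List.zip_cons_cons, List.foldl_cons]
      rw [show pvEmit a (inc, out) (p, q) = (!inc, out ++ [pvSeg a inc p q]) by
            simp [pvEmit, pvSeg]]
      have := ih (!inc) (out ++ [pvSeg a inc p q])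
      simp only [List.drop_succ_cons, List.drop_zero] at this
      rw [this, pvRender, List.append_assoc]
      simp

lemma pvModLast_snoc (f : List Int → List Int) (xs : List (List Int)) (y : List Int) :
    pvModLast f (xs ++ [y]) = xs ++ [f y] := by
  induction xs with
  | nil => rfl
  | cons x xs ih =>
    cases xs with
    | nil => rfl
    | cons z zs => simpa [pvModLast] using ih

lemma pvRender_snoc2 (a : List Int) (l : List Int) (p q : Int) : ∀ inc : Bool,
    pvRender a inc (l ++ [p, q]) =
      pvRender a inc (l ++ [p]) ++ [pvSeg a (if l.length % 2 = 0 then inc else !inc) p q] := by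
  induction l with
  | nil => intro inc; simp [pvRender]
  | cons x l ih =>
    intro inc
    cases l with
    | nil => simp [pvRender]
    | cons y l' =>
      have ih' := ih (!inc)
      simp only [List.cons_append] at ih' ⊢
      simp only [pvRender, List.length_cons] at ih' ⊢
      rw [ih']
      by_cases h : (l'.length + 1) % 2 = 0
      · have h2 : ¬ (l'.length + 1 + 1) % 2 = 0 := by omega
        simp [h, h2]
      · have h2 : (l'.length + 1 + 1) % 2 = 0 := by omega
        simp [h, h2]

lemma pvSlice_succ (a : List Int) (p : Int) (k : Nat) (hp0 : 0 ≤ p) (hpk : p ≤ (k : Int))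
    (hk : k < a.length) :
    PySem.List.slice a (some p) (some ((k : Int) + 1)) =
      PySem.List.slice a (some p) (some (k : Int)) ++ [a[k]] := by
  rw [PySem.List.slice_toNat a hp0 (by omega), PySem.List.slice_toNat a hp0 (by omega)]
  have h1 : ((k : Int) + 1).toNat = k + 1 := by omega
  have h2 : ((k : Int)).toNat = k := by omega
  have hple : p.toNat ≤ k := by omega
  rw [h1, h2]
  have hsub : k + 1 - p.toNat = (k - p.toNat) + 1 := by omega
  rw [hsub, List.take_add_one]
  congr 1
  have hlen : (a.drop p.toNat).length = a.length - p.toNat := List.length_drop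
  have hlt : k - p.toNat < (a.drop p.toNat).length := by rw [hlen]; omega
  rw [List.getElem?_eq_getElem hlt]
  have : (a.drop p.toNat)[k - p.toNat] = a[p.toNat + (k - p.toNat)] := List.getElem_drop ..
  rw [this]
  have hidx : p.toNat + (k - p.toNat) = k := by omega
  simp only [hidx, Option.toList_some]

lemma pvSlice_single (a : List Int) (k : Nat) (hk : k < a.length) :
    PySem.List.slice a (some (k : Int)) (some ((k : Int) + 1)) = [a[k]] := by
  rw [pvSlice_succ a (k : Int) k (by omega) le_rfl hk]
  rw [PySem.List.slice_toNat a (by omega) (by omega)]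
  simp

-- The joint loop invariant: after processing indices 1..k, A's flag equals B's flag, the flag
-- tracks the parity of the boundary list, the last boundary is in [0,k], and A's sequences are
-- exactly B's render of (boundaries ++ [k+1]).
def pvInv (a : List Int) (k : Nat) (sA : Bool × List (List Int)) (sB : Bool × List Int) : Prop :=
  sA.1 = sB.1 ∧ (sB.1 = true ↔ sB.2.length % 2 = 1) ∧
  (∃ l lb, sB.2 = l ++ [lb] ∧ 0 ≤ lb ∧ lb ≤ (k : Int)) ∧
  sA.2 = pvRender a true (sB.2 ++ [(k : Int) + 1])

lemma pvStep_preserve (a : List Int) (k : Nat) (hk : k + 1 < a.length)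
    (sA : Bool × List (List Int)) (sB : Bool × List Int) (h : pvInv a k sA sB) :
    pvInv a (k + 1) (pvStepA a sA ((k : Int) + 1)) (pvStepB a sB ((k : Int) + 1)) := by
  obtain ⟨iA, seqs⟩ := sA
  obtain ⟨iB, bds⟩ := sB
  obtain ⟨h1, h2, ⟨l, lb, hbds, hlb0, hlbk⟩, h4⟩ := h
  simp only at h1 h2 h4 hbds
  subst h1
  have hklen : k < a.length := by omega
  have hprev : PySem.List.pyGetD a ((k : Int) + 1 - 1) 0 = a[k] := by
    have he : (k : Int) + 1 - 1 = ((k : Nat) : Int) := by ring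
    rw [he, PySem.List.pyGetD_eq_getElem a 0 (by omega) (by exact_mod_cast hklen)]
    simp
  have hcur : PySem.List.pyGetD a ((k : Int) + 1) 0 = a[k + 1] := by
    have he : (k : Int) + 1 = ((k + 1 : Nat) : Int) := by push_cast; ring
    rw [he, PySem.List.pyGetD_eq_getElem a 0 (by omega) (by exact_mod_cast hk)]
    simp
  have hseg : ∀ b : Bool, pvSeg a b ((k : Int) + 1) ((k : Int) + 1 + 1) = [a[k + 1]] := by
    intro b
    have hs := pvSlice_single a (k + 1) hk
    push_cast at hs
    cases b <;> simp [pvSeg, hs]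
  have hgrow : PySem.List.slice a (some lb) (some ((k : Int) + 1 + 1)) =
      PySem.List.slice a (some lb) (some ((k : Int) + 1)) ++ [a[k + 1]] := by
    have hs := pvSlice_succ a lb (k + 1) hlb0 (by push_cast; omega) hk
    push_cast at hs
    exact hs
  have hcast : ((k + 1 : Nat) : Int) + 1 = (k : Int) + 1 + 1 := by push_cast; ring
  have hlenl : iA = true ↔ l.length % 2 = 0 := by
    rw [h2, hbds]; simp; omega
  have hkget : a[k]? = some a[k] := List.getElem?_eq_getElem (by omega)
  have hk1get : a[k + 1]? = some a[k + 1] := List.getElem?_eq_getElem hk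
  have e1 : (l ++ [lb]) ++ [(k : Int) + 1] = l ++ [lb, (k : Int) + 1] := by simp
  have e2 : (l ++ [lb]) ++ [(k : Int) + 1 + 1] = l ++ [lb, (k : Int) + 1 + 1] := by simp
  have e3 : (bds ++ [(k : Int) + 1]) ++ [(k : Int) + 1 + 1] = bds ++ [(k : Int) + 1, (k : Int) + 1 + 1] := by simp
  simp only [pvInv, hcast]
  rcases iA with _ | _
  · -- decreasing
    by_cases hge : a[k] ≥ a[k + 1]
    · have hlt : ¬ a[k] < a[k + 1] := by omega
      have hA : pvStepA a (false, seqs) ((k : Int) + 1) =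
          (false, pvModLast (fun d => a[k + 1] :: d) seqs) := by
        simp [pvStepA, hcur, hkget, hge]
      have hB : pvStepB a (false, bds) ((k : Int) + 1) = (false, bds) := by
        simp [pvStepB, hcur, hkget, hlt]
      rw [hA, hB]
      refine ⟨rfl, h2, ⟨l, lb, hbds, hlb0, by push_cast; omega⟩, ?_⟩
      have hpar : ¬ l.length % 2 = 0 := fun hc => absurd (hlenl.mpr hc) (by decide)
      have hflag : (if l.length % 2 = 0 then true else (!true)) = false := by simp [hpar]
      simp only [h4, hbds]
      rw [e1, e2, pvRender_snoc2, pvRender_snoc2, hflag, pvModLast_snoc]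
      simp [pvSeg, hgrow]
    · have hlt : a[k] < a[k + 1] := by omega
      have hA : pvStepA a (false, seqs) ((k : Int) + 1) = (true, seqs ++ [[a[k + 1]]]) := by
        simp [pvStepA, hcur, hkget, hlt]
      have hB : pvStepB a (false, bds) ((k : Int) + 1) = (true, bds ++ [(k : Int) + 1]) := by
        simp [pvStepB, hcur, hkget, hlt]
      rw [hA, hB]
      refine ⟨rfl, ?_, ⟨bds, (k : Int) + 1, rfl, by omega, by push_cast; omega⟩, ?_⟩
      · simp at h2 ⊢; omega
      · rw [e3, pvRender_snoc2, hseg, h4]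
  · -- increasing
    by_cases hle : a[k] ≤ a[k + 1]
    · have hgt : ¬ a[k] > a[k + 1] := by omega
      have hA : pvStepA a (true, seqs) ((k : Int) + 1) =
          (true, pvModLast (fun d => d ++ [a[k + 1]]) seqs) := by
        simp [pvStepA, hcur, hkget, hle]
      have hB : pvStepB a (true, bds) ((k : Int) + 1) = (true, bds) := by
        simp [pvStepB, hcur, hkget, hgt]
      rw [hA, hB]
      refine ⟨rfl, h2, ⟨l, lb, hbds, hlb0, by push_cast; omega⟩, ?_⟩
      have hflag : (if l.length % 2 = 0 then true else (!true)) = true := by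
        simp [hlenl.mp rfl]
      simp only [h4, hbds]
      rw [e1, e2, pvRender_snoc2, pvRender_snoc2, hflag, pvModLast_snoc]
      simp [pvSeg, hgrow]
    · have hgt : a[k] > a[k + 1] := by omega
      have hA : pvStepA a (true, seqs) ((k : Int) + 1) = (false, seqs ++ [[a[k + 1]]]) := by
        simp [pvStepA, hcur, hkget, not_le.mpr hgt]
      have hB : pvStepB a (true, bds) ((k : Int) + 1) = (false, bds ++ [(k : Int) + 1]) := by
        simp [pvStepB, hcur, hkget, hgt]
      rw [hA, hB]
      refine ⟨rfl, ?_, ⟨bds, (k : Int) + 1, rfl, by omega, by push_cast; omega⟩, ?_⟩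
      · simp at h2 ⊢; omega
      · rw [e3, pvRender_snoc2, hseg, h4]

lemma pvInvariant (a : List Int) : ∀ (k : Nat), k < a.length →
    pvInv a k
      ((PySem.List.pyRange 1 ((k : Int) + 1) 1).foldl (pvStepA a) (true, [[PySem.List.pyGetD a 0 0]]))
      ((PySem.List.pyRange 1 ((k : Int) + 1) 1).foldl (pvStepB a) (true, [0])) := by
  intro k
  induction k with
  | zero =>
    intro hk
    rw [show ((0 : Nat) : Int) + 1 = 1 by ring, PySem.List.pyRange_one_eq_nil le_rfl]
    refine ⟨rfl, by simp, ⟨[], 0, rfl, le_rfl, le_rfl⟩, ?_⟩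
    have hs := pvSlice_single a 0 hk
    simp only [Nat.cast_zero, zero_add] at hs
    simp only [List.foldl_nil, Nat.cast_zero, zero_add, List.singleton_append]
    rw [PySem.List.pyGetD_eq_getElem a 0 (le_refl 0) (by exact_mod_cast hk)]
    simp [pvRender, pvSeg, hs]
  | succ k ih =>
    intro hk
    have hcast : ((k + 1 : Nat) : Int) + 1 = ((k : Int) + 1) + 1 := by push_cast; ring
    rw [hcast, PySem.List.pyRange_one_succ_right (by omega), List.foldl_append, List.foldl_append]
    simp only [List.foldl_cons, List.foldl_nil]
    exact pvStep_preserve a k (by omega) _ _ (ih (by omega))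

-- ===== VERDICT (by name: the statement is the Claim_ definition above) =====
theorem find_each_sequence_spec : Claim_equal_find_each_sequence := by
  intro a _ hpre
  unfold Spec_find_each_sequence find_each_sequence find_each_sequence_alt
  have hlen : 0 < a.length := List.length_pos_iff.mpr hpre
  have hk : a.length - 1 < a.length := by omega
  have hcast : (((a.length - 1 : Nat)) : Int) + 1 = (a.length : Int) := by omega
  obtain ⟨_, _, _, h4⟩ := pvInvariant a (a.length - 1) hk
  rw [hcast] at h4
  dsimp only
  rw [PySem.List.slice_from _ (by omega)]
  rw [show ((1 : Int)).toNat = 1 from rfl]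
  rw [pvEmit_fold]
  simpa using h4
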